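-- pv_equiv track=rewrite | github.com/acecocoa/CORRECT-SCORE-PREDICTOR-FLASHSCORE-SCORES-SCRAPER-AND-PARSER | PREDICTOR(F4)(short).py | analyze_zero_pattern
-- ===== SOURCE A (Python) =====
-- def analyze_zero_pattern(series):
--     zero_sequences=[]; i=0; n=len(series)
--     while i<n:
--         if series[i]==0:
--             start=i
--             while i<n and series[i]==0: i+=1
--             length=i-start
--             if length>2 and i<n: zero_sequences.append(series[i])
--         else: i+=1
--     zero_signal=None; last_value=None
--     if len(zero_sequences)>=3:
--         bbl,bl,last_value=zero_sequences[-3],zero_sequences[-2],zero_sequences[-1]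
--         if bl>bbl: zero_signal="FEW"
--         elif bl<bbl: zero_signal="LOT"
--     return zero_sequences,zero_signal,last_value
-- ===== SOURCE B (Python) =====
-- def analyze_zero_pattern(series):
--     # Run-length encode the series, then pick each run that follows a zero-run of length > 2.
--     runs = []
--     for x in series:
--         if runs and runs[-1][0] == x:
--             runs[-1] = (x, runs[-1][1] + 1)
--         else:
--             runs.append((x, 1))
--     zero_sequences = [nxt[0] for cur, nxt in zip(runs, runs[1:])
--                       if cur[0] == 0 and cur[1] > 2]
--     zero_signal = None
--     last_value = None
--     if len(zero_sequences) >= 3: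
--         bbl, bl, last_value = zero_sequences[-3], zero_sequences[-2], zero_sequences[-1]
--         if bl > bbl:
--             zero_signal = "FEW"
--         elif bl < bbl:
--             zero_signal = "LOT"
--     return zero_sequences, zero_signal, last_value
-- ===== Notes on version B (the rewrite author's own statement) =====
-- stated objective: idiomatic
-- what changed: Replaces A's index-based nested while loops with a single run-length-encoding pass followed by a zip-with-lookahead comprehension over the runs; the trend block is unchanged.
import Mathlib
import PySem

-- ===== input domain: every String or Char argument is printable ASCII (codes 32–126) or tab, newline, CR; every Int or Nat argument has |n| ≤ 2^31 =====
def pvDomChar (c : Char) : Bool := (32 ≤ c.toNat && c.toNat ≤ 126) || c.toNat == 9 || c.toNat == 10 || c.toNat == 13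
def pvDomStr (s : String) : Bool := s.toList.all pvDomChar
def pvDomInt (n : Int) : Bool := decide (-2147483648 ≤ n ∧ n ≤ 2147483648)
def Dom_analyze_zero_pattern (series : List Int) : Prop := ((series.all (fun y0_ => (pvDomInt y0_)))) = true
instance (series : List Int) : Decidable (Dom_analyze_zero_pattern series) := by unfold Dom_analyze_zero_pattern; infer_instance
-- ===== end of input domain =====

-- B replaces A's index-based nested while loops with run-length encoding plus a lookahead scan over the runs (idiomatic, same cost).

-- ===== PORT A =====
-- inner `while i<n and series[i]==0: i+=1`
def pyInner (series : List Int) (i : Nat) : Nat :=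
  if _h : i < series.length ∧ series.getD i 0 = 0 then pyInner series (i + 1) else i
termination_by series.length - i
decreasing_by omega

theorem pyInner_ge (series : List Int) (i : Nat) : i ≤ pyInner series i := by
  unfold pyInner
  split
  · have := pyInner_ge series (i + 1); omega
  · exact le_rfl
termination_by series.length - i
decreasing_by omega

theorem pyInner_gt (series : List Int) (i : Nat)
    (h1 : i < series.length) (h2 : series.getD i 0 = 0) : i < pyInner series i := by
  rw [pyInner]
  rw [dif_pos ⟨h1, h2⟩]
  have := pyInner_ge series (i + 1); omega

-- outer `while i<n: …`
def pyOuter (series : List Int) (i : Nat) (acc : List Int) : List Int :=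
  if h : i < series.length then
    if hz : series.getD i 0 = 0 then
      let j := pyInner series i
      let acc' := if j - i > 2 ∧ j < series.length then acc ++ [series.getD j 0] else acc
      pyOuter series j acc'
    else pyOuter series (i + 1) acc
  else acc
termination_by series.length - i
decreasing_by
  · have := pyInner_gt series i h hz; omega
  · omega

def analyze_zero_pattern (series : List Int) : List Int × Option String × Option Int :=
  let zs := pyOuter series 0 []
  if 3 ≤ zs.length then
    let bbl := (PySem.List.pyGet? zs (-3)).getD 0
    let bl := (PySem.List.pyGet? zs (-2)).getD 0
    let lv := (PySem.List.pyGet? zs (-1)).getD 0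
    (zs, if bl > bbl then some "FEW" else if bl < bbl then some "LOT" else none, some lv)
  else (zs, none, none)

-- ===== PORT B =====
-- one step of B's run-building loop (Python mutates runs[-1] / appends; here the runs list is kept reversed and reversed at the end)
def stepB (acc : List (Int × Nat)) (x : Int) : List (Int × Nat) :=
  match acc with
  | (y, k) :: rest => if x = y then (y, k + 1) :: rest else (x, 1) :: (y, k) :: rest
  | [] => [(x, 1)]

def analyze_zero_pattern_alt (series : List Int) : List Int × Option String × Option Int :=
  let runs := (series.foldl stepB []).reverse
  let zs := (runs.zip runs.tail).filterMap
      (fun p => if p.1.1 = 0 ∧ p.1.2 > 2 then some p.2.1 else none)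
  if 3 ≤ zs.length then
    let bbl := (PySem.List.pyGet? zs (-3)).getD 0
    let bl := (PySem.List.pyGet? zs (-2)).getD 0
    let lv := (PySem.List.pyGet? zs (-1)).getD 0
    (zs, if bl > bbl then some "FEW" else if bl < bbl then some "LOT" else none, some lv)
  else (zs, none, none)

-- ===== PRECONDITION & SPEC =====
def Spec_analyze_zero_pattern (series : List Int) (out : List Int × Option String × Option Int) : Prop := out = analyze_zero_pattern_alt series
instance (series : List Int) (out : List Int × Option String × Option Int) : Decidable (Spec_analyze_zero_pattern series out) := by unfold Spec_analyze_zero_pattern; infer_instance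

-- ===== CLAIM (what is proved, stated in full; the proofs are below) =====
def Claim_equal_analyze_zero_pattern : Prop := ∀ (series : List Int), Dom_analyze_zero_pattern series → Spec_analyze_zero_pattern series (analyze_zero_pattern series)

-- ===== LEMMAS AND PROOFS =====

-- Proof-layer run-length encoding (left-recursive form of B's foldl)
def grp (y : Int) (k : Nat) : List Int → List (Int × Nat)
  | [] => [(y, k)]
  | x :: xs => if x = y then grp y (k + 1) xs else (y, k) :: grp x 1 xs

def rle : List Int → List (Int × Nat)
  | [] => []
  | x :: xs => grp x 1 xs

def collect (rl : List (Int × Nat)) : List Int :=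
  (rl.zip rl.tail).filterMap (fun p => if p.1.1 = 0 ∧ p.1.2 > 2 then some p.2.1 else none)

theorem grp_head (xs : List Int) (y : Int) (k : Nat) :
    ∃ m t, grp y k xs = (y, m) :: t := by
  induction xs generalizing k with
  | nil => exact ⟨k, [], rfl⟩
  | cons x xs ih =>
    by_cases h : x = y
    · obtain ⟨m, t, ht⟩ := ih (k + 1)
      exact ⟨m, t, by simp [grp, h, ht]⟩
    · exact ⟨k, grp x 1 xs, by simp [grp, h]⟩

theorem collect_nil : collect [] = [] := rfl

theorem collect_single (y : Int) (k : Nat) : collect [(y, k)] = [] := rfl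

theorem collect_cons (y : Int) (k : Nat) (v : Int) (m : Nat) (rest : List (Int × Nat)) :
    collect ((y, k) :: (v, m) :: rest) =
      (if y = 0 ∧ k > 2 then [v] else []) ++ collect ((v, m) :: rest) := by
  by_cases h : y = 0 ∧ k > 2 <;> simp [collect, h]

-- k is irrelevant for a nonzero-keyed leading group
theorem collect_grp_nonzero (xs : List Int) (y : Int) (k1 k2 : Nat) (hy : y ≠ 0) :
    collect (grp y k1 xs) = collect (grp y k2 xs) := by
  induction xs generalizing k1 k2 with
  | nil => simp [grp, collect_single]
  | cons x xs ih =>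
    by_cases h : x = y
    · simp only [grp, if_pos h]; exact ih (k1 + 1) (k2 + 1)
    · simp only [grp, if_neg h]
      obtain ⟨m, t, ht⟩ := grp_head xs x 1
      rw [ht, collect_cons, collect_cons]
      simp [hy]

theorem collect_rle_cons_nonzero (x : Int) (r : List Int) (hx : x ≠ 0) :
    collect (rle (x :: r)) = collect (rle r) := by
  cases r with
  | nil => simp [rle, grp, collect_single, collect_nil]
  | cons z zs =>
    by_cases h : z = x
    · simp only [rle, grp, if_pos h]
      subst h
      exact collect_grp_nonzero zs z 2 1 hx
    · simp only [rle, grp, if_neg h]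
      obtain ⟨m, t, ht⟩ := grp_head zs z 1
      rw [ht, collect_cons]
      simp [hx]

-- peeling a zero-run
theorem collect_grp_zero (xs : List Int) (k : Nat) :
    collect (grp 0 k xs) =
      (if k + (xs.takeWhile (fun z => z == 0)).length > 2 ∧
          xs.dropWhile (fun z => z == 0) ≠ [] then
        [(xs.dropWhile (fun z => z == 0)).headD 0]
      else []) ++ collect (rle (xs.dropWhile (fun z => z == 0))) := by
  induction xs generalizing k with
  | nil => simp [grp, collect_single, rle, collect_nil]
  | cons x xs ih =>
    by_cases h : x = 0
    · subst h
      have h1 : grp (0:Int) k (0 :: xs) = grp 0 (k + 1) xs := by simp [grp]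
      rw [h1, ih (k + 1)]
      set L := (xs.takeWhile (fun z => z == 0)).length with hL
      have ht : (((0:Int) :: xs).takeWhile (fun z => z == 0)).length = L + 1 := by
        simp [List.takeWhile, hL]
      have hdw : ((0:Int) :: xs).dropWhile (fun z => z == 0) = xs.dropWhile (fun z => z == 0) := by
        simp [List.dropWhile]
      rw [ht, hdw]
      have harith : k + 1 + L = k + (L + 1) := by omega
      rw [harith]
    · have hb : (x == (0:Int)) = false := by simpa using h
      simp only [grp, if_neg h, List.takeWhile, List.dropWhile, hb]
      obtain ⟨m, t, ht⟩ := grp_head xs x 1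
      rw [ht, collect_cons, ← ht]
      simp [rle]

-- drop over takeWhile length = dropWhile
theorem drop_takeWhile_length (p : Int → Bool) (l : List Int) :
    l.drop (l.takeWhile p).length = l.dropWhile p := by
  induction l with
  | nil => rfl
  | cons x xs ih =>
    by_cases h : p x
    · simp [List.takeWhile, List.dropWhile, h, ih]
    · simp [List.takeWhile, List.dropWhile, h]

-- characterisation of the inner while loop
theorem pyInner_char (series : List Int) (i : Nat) :
    pyInner series i = i + ((series.drop i).takeWhile (fun z => z == 0)).length := by
  by_cases h : i < series.length ∧ series.getD i 0 = 0
  · rw [pyInner, dif_pos h]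
    have hd : series.drop i = series[i] :: series.drop (i + 1) :=
      List.drop_eq_getElem_cons h.1
    have hg : series[i] = (0:Int) := by
      have := h.2; rwa [List.getD_eq_getElem series 0 h.1] at this
    rw [pyInner_char series (i + 1)]
    rw [hd, hg]
    simp [List.takeWhile]
    omega
  · rw [pyInner, dif_neg h]
    by_cases hi : i < series.length
    · have hz : series.getD i 0 ≠ 0 := fun hc => h ⟨hi, hc⟩
      have hd : series.drop i = series[i] :: series.drop (i + 1) :=
        List.drop_eq_getElem_cons hi
      have hg : series[i] ≠ (0:Int) := by
        rwa [List.getD_eq_getElem series 0 hi] at hz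
      have hb : (series[i] == (0:Int)) = false := by simpa using hg
      rw [hd]
      simp [List.takeWhile, hb]
    · rw [List.drop_eq_nil_of_le (by omega)]
      simp
termination_by series.length - i
decreasing_by omega

-- characterisation of the outer while loop
theorem pyOuter_char (series : List Int) (i : Nat) (acc : List Int) :
    pyOuter series i acc = acc ++ collect (rle (series.drop i)) := by
  by_cases hi : i < series.length
  · have hd : series.drop i = series[i] :: series.drop (i + 1) :=
      List.drop_eq_getElem_cons hi
    by_cases hz : series.getD i 0 = 0
    · have hg : series[i] = (0:Int) := by
        rwa [List.getD_eq_getElem series 0 hi] at hz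
      rw [pyOuter, dif_pos hi, dif_pos hz]
      have hj := pyInner_char series i
      have hd1 : series.drop i = (0:Int) :: series.drop (i + 1) := by rw [hd, hg]
      set t' := ((series.drop (i + 1)).takeWhile (fun z => z == 0)).length with ht'
      have htval : pyInner series i = i + 1 + t' := by
        rw [hj, hd1]
        simp [List.takeWhile]
        try omega
      set rest := (series.drop (i + 1)).dropWhile (fun z => z == 0) with hrest
      have hdropj : series.drop (pyInner series i) = rest := by
        rw [htval, hrest, ← drop_takeWhile_length (fun z => z == 0) (series.drop (i + 1)),
          ← ht', ← List.drop_drop]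
      have hcoll : collect (rle (series.drop i)) =
          (if 1 + t' > 2 ∧ rest ≠ [] then [rest.headD 0] else []) ++ collect (rle rest) := by
        rw [hd1]
        exact collect_grp_zero (series.drop (i + 1)) 1
      rw [pyOuter_char series (pyInner series i) _, hdropj, hcoll]
      have hlen : rest.length = series.length - pyInner series i := by
        rw [← hdropj]; simp
      have hiff : (pyInner series i - i > 2 ∧ pyInner series i < series.length) ↔
          (1 + t' > 2 ∧ rest ≠ []) := by
        rw [htval]
        have : rest ≠ [] ↔ 0 < rest.length := by
          cases rest <;> simp
        rw [this, hlen, htval]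
        omega
      have hsplit : (if pyInner series i - i > 2 ∧ pyInner series i < series.length
            then acc ++ [series.getD (pyInner series i) 0] else acc) =
          acc ++ (if 1 + t' > 2 ∧ rest ≠ [] then [rest.headD 0] else []) := by
        split_ifs with h1 h2
        · have hc : pyInner series i < series.length := h1.2
          have hcons : series.drop (pyInner series i) =
              series[pyInner series i] :: series.drop (pyInner series i + 1) :=
            List.drop_eq_getElem_cons hc
          have : series.getD (pyInner series i) 0 = rest.headD 0 := by
            rw [List.getD_eq_getElem _ _ hc, ← hdropj, hcons]
            rfl
          rw [this]
        · exact absurd (hiff.mp h1) h2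
        · exact absurd (hiff.mpr ‹_›) ‹_›
        · simp
      rw [hsplit, List.append_assoc]
    · rw [pyOuter, dif_pos hi, dif_neg hz]
      have hg : series[i] ≠ (0:Int) := by
        rwa [List.getD_eq_getElem series 0 hi] at hz
      rw [pyOuter_char series (i + 1) acc, hd,
        collect_rle_cons_nonzero series[i] (series.drop (i + 1)) hg]
  · rw [pyOuter, dif_neg hi, List.drop_eq_nil_of_le (by omega)]
    simp [rle, collect_nil]
termination_by series.length - i
decreasing_by
  · have := pyInner_gt series i hi hz; omega
  · omega

-- B's foldl builds the reversed RLE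
theorem foldl_stepB (xs : List Int) (y : Int) (k : Nat) (rest : List (Int × Nat)) :
    xs.foldl stepB ((y, k) :: rest) = (grp y k xs).reverse ++ rest := by
  induction xs generalizing y k rest with
  | nil => simp [grp]
  | cons x xs ih =>
    by_cases h : x = y
    · simp [List.foldl, stepB, h, grp, ih]
    · simp only [List.foldl_cons, stepB, if_neg h, grp, ih]
      simp

theorem runsB_eq_rle (series : List Int) :
    (series.foldl stepB []).reverse = rle series := by
  cases series with
  | nil => rfl
  | cons x xs =>
    simp only [List.foldl_cons, stepB, rle]
    rw [foldl_stepB xs x 1 []]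
    simp

-- ===== VERDICT (by name: the statement is the Claim_ definition above) =====
theorem analyze_zero_pattern_spec : Claim_equal_analyze_zero_pattern := by
  intro series _
  unfold Spec_analyze_zero_pattern analyze_zero_pattern analyze_zero_pattern_alt
  have hz : pyOuter series 0 [] =
      (((series.foldl stepB []).reverse.zip (series.foldl stepB []).reverse.tail).filterMap
        (fun p => if p.1.1 = 0 ∧ p.1.2 > 2 then some p.2.1 else none)) := by
    rw [runsB_eq_rle, pyOuter_char series 0 []]
    simp [collect]
  simp only [hz]
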